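-- pv_equiv track=rewrite | github.com/DenysTT/leetcode | easy/is_doubled.py | is_doubled
-- ===== SOURCE A (Python) =====
-- def is_doubled(arr_1, arr_2):
--     freq_1 = {}
--     freq_2 = {}
--     if len(arr_1) != len(arr_2):
--         return False
--     for n in arr_1:
--         if n not in freq_1:
--             freq_1[n] = 1
--         else:
--             freq_1[n] = freq_1[n] + 1
--     for n in arr_2:
--         if n not in freq_2:
--             freq_2[n] = 1
--         else:
--             freq_2[n] = freq_2[n] + 1
--     for k,v in freq_1.items():
--         if k*2 not in freq_2:
--             return False
--         if freq_2[k*2] != freq_1[k]: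
--             return False
--     return True
-- ===== SOURCE B (Python) =====
-- def is_doubled(arr_1, arr_2):
--     if len(arr_1) != len(arr_2):
--         return False
--     remaining = list(arr_2)
--     for x in arr_1:
--         try:
--             remaining.remove(x * 2)
--         except ValueError:
--             return False
--     return True
-- ===== Notes on version B (the rewrite author's own statement) =====
-- stated objective: alternative
-- what changed: B consumes a working copy of arr_2 with list.remove(x*2) for each x of arr_1 instead of building and comparing two frequency dictionaries.
import Mathlib
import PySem

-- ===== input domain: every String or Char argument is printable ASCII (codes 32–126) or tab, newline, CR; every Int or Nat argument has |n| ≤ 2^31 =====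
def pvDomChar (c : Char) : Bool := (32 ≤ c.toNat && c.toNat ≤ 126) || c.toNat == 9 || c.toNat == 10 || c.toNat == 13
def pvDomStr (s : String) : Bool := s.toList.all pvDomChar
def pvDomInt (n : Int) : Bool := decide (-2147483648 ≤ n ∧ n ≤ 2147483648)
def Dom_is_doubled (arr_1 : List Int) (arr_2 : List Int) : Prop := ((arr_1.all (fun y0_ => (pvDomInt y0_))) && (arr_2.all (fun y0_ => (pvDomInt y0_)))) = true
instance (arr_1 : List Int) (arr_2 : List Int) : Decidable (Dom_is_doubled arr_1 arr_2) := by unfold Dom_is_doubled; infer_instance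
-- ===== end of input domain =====

-- B replaces A's two frequency dictionaries by consuming a working copy of arr_2 with
-- remove(x*2) per element of arr_1 (objective: alternative decomposition, same results).

-- ===== PORT A =====
-- the counting loop: 'if n not in freq: freq[n] = 1 else: freq[n] = freq[n] + 1'
-- (freq[n] on the else-branch always finds the key, so getD _ 0 is exact there)
def pvCountLoop (xs : List Int) : PySem.Dict Int Int :=
  xs.foldl (fun d n => if d.contains n = false then d.insert n 1 else d.insert n (d.getD n 0 + 1)) PySem.Dict.empty

-- the final loop over freq_1.items() with its two early returns
-- (freq_2[k*2] and freq_1[k] are guarded/keyed lookups, so getD _ 0 is exact)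
def pvCheckLoop (f1 f2 : PySem.Dict Int Int) : List (Int × Int) → Bool
  | [] => true
  | (k, _v) :: rest =>
      if f2.contains (k * 2) = false then false
      else if f2.getD (k * 2) 0 ≠ f1.getD k 0 then false
      else pvCheckLoop f1 f2 rest

def is_doubled (arr_1 : List Int) (arr_2 : List Int) : Bool :=
  if arr_1.length ≠ arr_2.length then false
  else
    let freq_1 := pvCountLoop arr_1
    let freq_2 := pvCountLoop arr_2
    pvCheckLoop freq_1 freq_2 freq_1.items

-- ===== PORT B =====
-- the consuming loop: remaining.remove(x*2), returning False on ValueError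
def pvConsume : List Int → List Int → Bool
  | [], _ => true
  | x :: rest, remaining =>
      match PySem.List.remove? remaining (x * 2) with
      | none => false
      | some remaining' => pvConsume rest remaining'

def is_doubled_alt (arr_1 : List Int) (arr_2 : List Int) : Bool :=
  if arr_1.length ≠ arr_2.length then false
  else pvConsume arr_1 arr_2

-- ===== PRECONDITION & SPEC =====
def Spec_is_doubled (arr_1 : List Int) (arr_2 : List Int) (out : Bool) : Prop := out = is_doubled_alt arr_1 arr_2
instance (arr_1 : List Int) (arr_2 : List Int) (out : Bool) : Decidable (Spec_is_doubled arr_1 arr_2 out) := by unfold Spec_is_doubled; infer_instance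

-- ===== CLAIM (what is proved, stated in full; the proofs are below) =====
def Claim_equal_is_doubled : Prop := ∀ (arr_1 : List Int) (arr_2 : List Int), Dom_is_doubled arr_1 arr_2 → Spec_is_doubled arr_1 arr_2 (is_doubled arr_1 arr_2)

-- ===== LEMMAS AND PROOFS =====

theorem pvCountLoop_eq_counter (xs : List Int) : pvCountLoop xs = PySem.Dict.counter xs := by
  rw [← PySem.Dict.foldl_insert_getD_add_one_eq_counter]
  unfold pvCountLoop
  generalize PySem.Dict.empty = d
  induction xs generalizing d with
  | nil => rfl
  | cons x xs ih =>
      simp only [List.foldl_cons]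
      rw [show (if d.contains x = false then d.insert x 1 else d.insert x (d.getD x 0 + 1))
            = d.insert x (d.getD x 0 + 1) from ?_]
      · exact ih _
      · by_cases h : d.contains x
        · simp [h]
        · simp only [Bool.not_eq_true] at h
          simp [h, PySem.Dict.getD_of_not_contains _ 0 h]

theorem pvCheckLoop_true_iff (f1 f2 : PySem.Dict Int Int) (l : List (Int × Int)) :
    pvCheckLoop f1 f2 l = true ↔
      ∀ p ∈ l, f2.contains (p.1 * 2) = true ∧ f2.getD (p.1 * 2) 0 = f1.getD p.1 0 := by
  induction l with
  | nil => simp [pvCheckLoop]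
  | cons p rest ih =>
      obtain ⟨k, v⟩ := p
      by_cases h1 : f2.contains (k * 2) = false
      · simp [pvCheckLoop, h1]
      · simp only [Bool.not_eq_false] at h1
        by_cases h2 : f2.getD (k * 2) 0 = f1.getD k 0
        · simp [pvCheckLoop, h1, h2, ih]
        · simp [pvCheckLoop, h1, h2]

theorem pvMul2_injective : Function.Injective (fun x : Int => x * 2) := by
  intro a b h; simpa using h

-- A's value characterised by counts
theorem is_doubled_iff (a1 a2 : List Int) :
    is_doubled a1 a2 = true ↔
      a1.length = a2.length ∧ ∀ k ∈ a1, (k * 2) ∈ a2 ∧ a2.count (k * 2) = a1.count k := by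
  unfold is_doubled
  by_cases hl : a1.length = a2.length
  · simp only [hl, ne_eq, not_true_eq_false, if_false, true_and]
    rw [pvCountLoop_eq_counter, pvCountLoop_eq_counter, pvCheckLoop_true_iff]
    constructor
    · intro h k hk
      have hmem : (k, (a1.count k : Int)) ∈ (PySem.Dict.counter a1).items := by
        rw [PySem.Dict.items_counter]
        exact List.mem_map.mpr ⟨k, (PySem.Set.mem_ofList _ _).mpr hk, rfl⟩
      have := h _ hmem
      simp only [PySem.Dict.contains_counter, PySem.Dict.getD_counter] at this
      refine ⟨by simpa using this.1, by exact_mod_cast this.2⟩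
    · intro h p hp
      rw [PySem.Dict.items_counter] at hp
      obtain ⟨k, hk, rfl⟩ := List.mem_map.mp hp
      have hk' : k ∈ a1 := (PySem.Set.mem_ofList _ _).mp hk
      have := h k hk'
      simp only [PySem.Dict.contains_counter, PySem.Dict.getD_counter]
      refine ⟨by simpa using this.1, by exact_mod_cast this.2⟩
  · simp [hl]

-- B's consuming loop characterised by counts (sub-multiset)
theorem pvConsume_true_iff (xs rem : List Int) :
    pvConsume xs rem = true ↔ ∀ m, (xs.map (fun x => x * 2)).count m ≤ rem.count m := by
  induction xs generalizing rem with
  | nil => simp [pvConsume]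
  | cons x xs ih =>
      cases h : PySem.List.remove? rem (x * 2) with
      | none =>
          have hnot : (x * 2) ∉ rem := (PySem.List.remove?_eq_none_iff _ _).mp h
          simp only [pvConsume, h]
          constructor
          · intro hfalse; exact absurd hfalse (by simp)
          · intro hc
            have := hc (x * 2)
            rw [List.count_eq_zero.mpr hnot] at this
            simp [List.count_cons_self] at this
      | some rem' =>
          have hmem : (x * 2) ∈ rem := by
            by_contra hn
            rw [(PySem.List.remove?_eq_none_iff _ _).mpr hn] at h; cases h
          have herase : rem' = rem.erase (x * 2) := by
            rw [PySem.List.remove?_eq_some_erase rem (x * 2) hmem] at h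
            exact (Option.some_inj.mp h).symm
          subst herase
          simp only [pvConsume, h, ih]
          have key : ∀ m, ((x :: xs).map (fun x => x * 2)).count m
              = (if m = x * 2 then 1 else 0) + (xs.map (fun x => x * 2)).count m := by
            intro m
            simp only [List.map_cons, List.count_cons, beq_iff_eq]
            split_ifs <;> omega
          have herase : ∀ m, (rem.erase (x * 2)).count m
              = rem.count m - (if m = x * 2 then 1 else 0) := by
            intro m
            rw [List.count_erase]
            by_cases hm : m = x * 2
            · subst hm; simp
            · simp [hm, Ne.symm hm]
          have hpos : 1 ≤ rem.count (x * 2) := List.count_pos_iff.mpr hmem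
          constructor
          · intro hc m
            have h1 := hc m
            rw [herase m] at h1
            rw [key m]
            by_cases hm : m = x * 2 <;> simp [hm] at h1 ⊢ <;> omega
          · intro hc m
            have h1 := hc m
            rw [key m] at h1
            rw [herase m]
            by_cases hm : m = x * 2 <;> simp [hm] at h1 ⊢ <;> omega

-- the bridge, given equal lengths
theorem counts_bridge (a1 a2 : List Int) (hl : a1.length = a2.length) :
    (∀ k ∈ a1, (k * 2) ∈ a2 ∧ a2.count (k * 2) = a1.count k) ↔
      (∀ m, (a1.map (fun x => x * 2)).count m ≤ a2.count m) := by
  constructor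
  · intro h m
    by_cases hm : m ∈ a1.map (fun x => x * 2)
    · obtain ⟨k, hk, rfl⟩ := List.mem_map.mp hm
      rw [List.count_map_of_injective _ _ pvMul2_injective]
      exact le_of_eq (h k hk).2.symm
    · rw [List.count_eq_zero.mpr hm]; exact Nat.zero_le _
  · intro h k hk
    have hle : ((a1.map (fun x => x * 2) : List Int) : Multiset Int) ≤ (a2 : Multiset Int) := by
      rw [Multiset.le_iff_count]
      intro m
      simpa using h m
    have hcard : Multiset.card ((a2 : List Int) : Multiset Int)
        ≤ Multiset.card ((a1.map (fun x => x * 2) : List Int) : Multiset Int) := by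
      simp [hl]
    have heq := Multiset.eq_of_le_of_card_le hle hcard
    have hcnt : ∀ m, (a1.map (fun x => x * 2)).count m = a2.count m := by
      intro m
      have := congrArg (Multiset.count m) heq
      simpa using this
    have hck : a2.count (k * 2) = a1.count k := by
      rw [← hcnt (k * 2), List.count_map_of_injective _ _ pvMul2_injective]
    refine ⟨?_, hck⟩
    have : 0 < a2.count (k * 2) := by
      rw [hck]; exact List.count_pos_iff.mpr hk
    exact List.count_pos_iff.mp this

-- ===== VERDICT (by name: the statement is the Claim_ definition above) =====
theorem is_doubled_spec : Claim_equal_is_doubled := by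
  intro a1 a2 _
  unfold Spec_is_doubled
  by_cases hl : a1.length = a2.length
  · have hA := is_doubled_iff a1 a2
    have hB : is_doubled_alt a1 a2 = true ↔ ∀ m, (a1.map (fun x => x * 2)).count m ≤ a2.count m := by
      unfold is_doubled_alt
      simp [hl, pvConsume_true_iff]
    have : is_doubled a1 a2 = true ↔ is_doubled_alt a1 a2 = true := by
      rw [hA, hB, ← counts_bridge a1 a2 hl]
      simp [hl]
    cases hav : is_doubled a1 a2 <;> cases hbv : is_doubled_alt a1 a2 <;> simp_all
  · unfold is_doubled is_doubled_alt
    simp [hl]
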